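-- pv_equiv track=rewrite | github.com/d100000/MeshCanvas | app/llm_client.py | _split_system_messages
-- ===== SOURCE A (Python) =====
-- def _split_system_messages(messages: list[dict[str, str]]) -> tuple[str | None, list[dict[str, str]]]:
--     """Anthropic requires system prompt as a top-level parameter, not in messages."""
--     system_parts: list[str] = []
--     non_system: list[dict[str, str]] = []
--     for m in messages:
--         if m.get("role") == "system":
--             content = m.get("content", "").strip()
--             if content:
--                 system_parts.append(content)
--         else:
--             non_system.append(m)
--     # Anthropic requires messages to start with "user" role.
--     # If first message is "assistant", prepend a minimal user message.
--     if non_system and non_system[0].get("role") != "user":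
--         non_system.insert(0, {"role": "user", "content": "请继续。"})
--     # Anthropic doesn't allow consecutive same-role messages; merge them.
--     merged: list[dict[str, str]] = []
--     for m in non_system:
--         if merged and merged[-1]["role"] == m["role"]:
--             merged[-1] = {
--                 "role": m["role"],
--                 "content": merged[-1]["content"] + "\n\n" + m.get("content", ""),
--             }
--         else:
--             merged.append(dict(m))
--     system_text = "\n\n".join(system_parts) if system_parts else None
--     return system_text, merged
-- ===== SOURCE B (Python) =====
-- def _split_system_messages(messages):
--     sys_contents = [m.get("content", "").strip() for m in messages if m.get("role") == "system"]
--     system_parts = [c for c in sys_contents if c]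
--     non_system = [m for m in messages if m.get("role") != "system"]
--     if non_system and non_system[0].get("role") != "user":
--         non_system = [{"role": "user", "content": "请继续。"}] + non_system
--     # merge runs of consecutive same-role messages, one output dict per run
--     merged = []
--     i, n = 0, len(non_system)
--     while i < n:
--         j = i + 1
--         while j < n and non_system[j]["role"] == non_system[i]["role"]:
--             j += 1
--         if j == i + 1:
--             merged.append(dict(non_system[i]))
--         else:
--             parts = [non_system[i]["content"]] + [non_system[k].get("content", "") for k in range(i + 1, j)]
--             merged.append({"role": non_system[i]["role"], "content": "\n\n".join(parts)})
--         i = j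
--     system_text = "\n\n".join(system_parts) if system_parts else None
--     return system_text, merged
-- ===== Notes on version B (the rewrite author's own statement) =====
-- stated objective: alternative
-- what changed: A's merge loop repeatedly rewrites the last accumulated dict (merged[-1]) to extend a run; B instead scans the list by maximal runs of equal roles and emits one output dict per run (copy for a singleton run, one join of all contents for a longer run), with the system-filter phase done by comprehensions.
import Mathlib
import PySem

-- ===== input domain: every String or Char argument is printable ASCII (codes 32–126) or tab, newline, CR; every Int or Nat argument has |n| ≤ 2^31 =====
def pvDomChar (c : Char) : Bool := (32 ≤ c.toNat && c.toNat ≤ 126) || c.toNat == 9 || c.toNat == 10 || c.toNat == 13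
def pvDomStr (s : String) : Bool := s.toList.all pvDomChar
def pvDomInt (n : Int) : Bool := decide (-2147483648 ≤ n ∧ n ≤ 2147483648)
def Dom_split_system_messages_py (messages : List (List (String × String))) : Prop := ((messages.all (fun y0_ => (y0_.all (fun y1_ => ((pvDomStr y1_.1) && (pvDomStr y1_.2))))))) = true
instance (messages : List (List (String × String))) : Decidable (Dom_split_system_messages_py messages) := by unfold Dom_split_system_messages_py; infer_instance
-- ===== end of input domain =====

-- B replaces A's rewrite-the-last-accumulator merge loop by a run-grouping scan that emits one
-- output dict per maximal run of equal roles (objective: alternative decomposition, same cost).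

-- shared dict primitives (dict = assoc list, first-match lookup)
def pvGet (m : List (String × String)) (k : String) : Option String :=
  (m.find? (fun p => p.1 == k)).map (·.2)
def pvGetD (m : List (String × String)) (k d : String) : String := (pvGet m k).getD d
-- m["role"]: Python raises KeyError when the key is missing; ported with default "" — Pre_ excludes those inputs
def pvRole (m : List (String × String)) : String := pvGetD m "role" ""
def pvUserMsg : List (String × String) := [("role", "user"), ("content", "请继续。")]

-- ===== PORT A =====
def pvStepA (st : List String × List (List (String × String))) (m : List (String × String)) :
    List String × List (List (String × String)) :=
  if pvGet m "role" = some "system" then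
    let content := PySem.Str.strip (pvGetD m "content" "")
    if content ≠ "" then (st.1 ++ [content], st.2) else st
  else (st.1, st.2 ++ [m])

-- the merge loop; merged[-1]["content"] ported as pvGetD … "" (KeyError inputs excluded by Pre_)
def pvMergeA : List (List (String × String)) → List (List (String × String)) → List (List (String × String))
  | merged, [] => merged
  | merged, m :: ms =>
    if merged ≠ [] ∧ pvRole (merged.getLast?.getD []) = pvRole m then
      pvMergeA (merged.dropLast ++ [[("role", pvRole m),
        ("content", pvGetD (merged.getLast?.getD []) "content" "" ++ "\n\n" ++ pvGetD m "content" "")]]) ms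
    else pvMergeA (merged ++ [m]) ms

def split_system_messages_py (messages : List (List (String × String))) :
    Option String × (List (List (String × String))) :=
  let st := messages.foldl pvStepA ([], [])
  let non_system := if st.2 ≠ [] ∧ pvGet (st.2.headD []) "role" ≠ some "user" then pvUserMsg :: st.2 else st.2
  ((if st.1 ≠ [] then some (PySem.Str.join "\n\n" st.1) else none), pvMergeA [] non_system)

-- ===== PORT B =====
-- one output dict for a run m :: run of equal-role messages (run-first ["content"] via pvGetD, as above)
def pvRunDict (m : List (String × String)) (run : List (List (String × String))) : List (String × String) :=
  [("role", pvRole m),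
   ("content", PySem.Str.join "\n\n" (pvGetD m "content" "" :: run.map (fun x => pvGetD x "content" "")))]

def pvMergeB : List (List (String × String)) → List (List (String × String))
  | [] => []
  | m :: ms =>
    let run := ms.takeWhile (fun x => pvRole x == pvRole m)
    (if run = [] then m else pvRunDict m run) :: pvMergeB (ms.dropWhile (fun x => pvRole x == pvRole m))
termination_by l => l.length
decreasing_by
  have := List.length_dropWhile_le (fun x => pvRole x == pvRole m) ms
  simp only [List.length_cons]; omega

def split_system_messages_py_alt (messages : List (List (String × String))) :
    Option String × (List (List (String × String))) :=
  let sysContents := (messages.filter (fun m => pvGet m "role" == some "system")).map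
    (fun m => PySem.Str.strip (pvGetD m "content" ""))
  let system_parts := sysContents.filter (fun c => c != "")
  let ns := messages.filter (fun m => pvGet m "role" != some "system")
  let non_system := if ns ≠ [] ∧ pvGet (ns.headD []) "role" ≠ some "user" then pvUserMsg :: ns else ns
  ((if system_parts ≠ [] then some (PySem.Str.join "\n\n" system_parts) else none), pvMergeB non_system)

-- ===== PRECONDITION & SPEC =====
def pvHasKey (m : List (String × String)) (k : String) : Bool := (pvGet m k).isSome
-- the non-system messages, with the "user" message prepended exactly when A prepends it
def pvNS (messages : List (List (String × String))) : List (List (String × String)) :=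
  let ns := messages.filter (fun m => pvGet m "role" != some "system")
  if ns ≠ [] ∧ pvGet (ns.headD []) "role" ≠ some "user" then pvUserMsg :: ns else ns
-- a message that starts a run of ≥ 2 equal roles must carry a "content" key (prev = role of the message before x)
def pvRunsOk : Option (Option String) → List (List (String × String)) → Bool
  | _, [] => true
  | _, [_] => true
  | prev, x :: y :: rest =>
      (!((pvGet x "role" == pvGet y "role") && (prev != some (pvGet x "role"))) || pvHasKey x "content")
        && pvRunsOk (some (pvGet x "role")) (y :: rest)

-- Pre_ excludes exactly the inputs where the Python A raises KeyError in its merge loop: a non-system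
-- message without a "role" key when there are ≥ 2 non-system messages (after the prepend), or a
-- run-starting message of a ≥ 2-long equal-role run without a "content" key.
def Pre_split_system_messages_py (messages : List (List (String × String))) : Prop :=
  ((pvNS messages).length < 2 ∨ ∀ m ∈ pvNS messages, pvHasKey m "role" = true)
  ∧ pvRunsOk none (pvNS messages) = true
instance (messages : List (List (String × String))) : Decidable (Pre_split_system_messages_py messages) := by
  unfold Pre_split_system_messages_py; infer_instance

def pvWitness_split_system_messages_py : (List (List (String × String))) :=
  [[("role", "user"), ("content", "hello")], [("role", "system"), ("content", " be brief ")]]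

def Spec_split_system_messages_py (messages : List (List (String × String))) (out : Option String × (List (List (String × String)))) : Prop := out = split_system_messages_py_alt messages
instance (messages : List (List (String × String))) (out : Option String × (List (List (String × String)))) : Decidable (Spec_split_system_messages_py messages out) := by unfold Spec_split_system_messages_py; infer_instance

-- ===== CLAIM (what is proved, stated in full; the proofs are below) =====
def Claim_equal_split_system_messages_py : Prop := ∀ (messages : List (List (String × String))), Dom_split_system_messages_py messages → Pre_split_system_messages_py messages → Spec_split_system_messages_py messages (split_system_messages_py messages)

-- ===== LEMMAS AND PROOFS =====

-- join bookkeeping (Chars level)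
theorem pvJoin_two (sep a b : List Char) : PySem.Chars.join sep [a, b] = a ++ sep ++ b := by
  rw [PySem.Chars.join_cons_cons, PySem.Chars.join_singleton]

theorem pvJoin_fuse (sep a b : List Char) (l : List (List Char)) :
    PySem.Chars.join sep ((a ++ sep ++ b) :: l) = PySem.Chars.join sep (a :: b :: l) := by
  cases l with
  | nil => rw [PySem.Chars.join_cons_cons, PySem.Chars.join_singleton, PySem.Chars.join_singleton]
  | cons x xs =>
      rw [PySem.Chars.join_cons_cons, PySem.Chars.join_cons_cons, PySem.Chars.join_cons_cons]
      simp

theorem pvStrJoin_two (a b : String) : PySem.Str.join "\n\n" [a, b] = a ++ "\n\n" ++ b := by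
  apply String.toList_inj.mp
  rw [PySem.Str.toList_join]
  simp [pvJoin_two]

theorem pvStrJoin_fuse (a b : String) (l : List String) :
    PySem.Str.join "\n\n" ((a ++ "\n\n" ++ b) :: l) = PySem.Str.join "\n\n" (a :: b :: l) := by
  apply String.toList_inj.mp
  rw [PySem.Str.toList_join, PySem.Str.toList_join]
  rw [List.map_cons, List.map_cons, List.map_cons]
  rw [show (a ++ "\n\n" ++ b).toList = a.toList ++ "\n\n".toList ++ b.toList by simp]
  exact pvJoin_fuse _ _ _ _

-- phase 1: A's single fold computes B's filter/map pipelines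
theorem pvFoldl_phase1 (messages : List (List (String × String))) :
    ∀ (a : List String) (b : List (List (String × String))),
    messages.foldl pvStepA (a, b) =
      (a ++ ((messages.filter (fun m => pvGet m "role" == some "system")).map
              (fun m => PySem.Str.strip (pvGetD m "content" ""))).filter (fun c => c != ""),
       b ++ messages.filter (fun m => pvGet m "role" != some "system")) := by
  induction messages with
  | nil => simp
  | cons m t ih =>
      intro a b
      simp only [List.foldl_cons, pvStepA]
      by_cases h : pvGet m "role" = some "system"
      · by_cases hc : PySem.Str.strip (pvGetD m "content" "") ≠ ""
        · simp only [h, if_pos hc, ih]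
          simp [h, hc]
        · simp only [h, if_neg hc, ih]
          simp at hc
          simp [h, hc]
      · simp only [if_neg h, ih]
        simp [h, List.append_assoc]

theorem pvRole_runDict (m : List (String × String)) (run : List (List (String × String))) :
    pvRole (pvRunDict m run) = pvRole m := by
  simp [pvRole, pvRunDict, pvGetD, pvGet]

theorem pvContent_runDict (m : List (String × String)) (run : List (List (String × String))) :
    pvGetD (pvRunDict m run) "content" "" =
      PySem.Str.join "\n\n" (pvGetD m "content" "" :: run.map (fun x => pvGetD x "content" "")) := by
  simp [pvRunDict, pvGetD, pvGet]

-- folding one more element into a run accumulator is extending the run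
theorem pvRunDict_fuse (d m : List (String × String)) (L : List (List (String × String))) :
    pvRunDict (pvRunDict d [m]) L = pvRunDict d (m :: L) := by
  show [("role", pvRole (pvRunDict d [m])),
        ("content", PySem.Str.join "\n\n"
          (pvGetD (pvRunDict d [m]) "content" "" :: L.map (fun x => pvGetD x "content" "")))] =
      [("role", pvRole d),
       ("content", PySem.Str.join "\n\n"
          (pvGetD d "content" "" :: (m :: L).map (fun x => pvGetD x "content" "")))]
  rw [pvRole_runDict, pvContent_runDict]
  simp only [List.map_cons, List.map_nil]
  rw [pvStrJoin_two, pvStrJoin_fuse]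

-- A's merge loop only ever touches the last accumulated dict
theorem pvMergeA_append (ns : List (List (String × String))) :
    ∀ (acc : List (List (String × String))) (d : List (String × String)),
    pvMergeA (acc ++ [d]) ns = acc ++ pvMergeA [d] ns := by
  induction ns with
  | nil => intro acc d; simp [pvMergeA]
  | cons m ms ih =>
      intro acc d
      by_cases h : pvRole d = pvRole m
      · rw [show pvMergeA (acc ++ [d]) (m :: ms) =
              pvMergeA (acc ++ [[("role", pvRole m),
                ("content", pvGetD d "content" "" ++ "\n\n" ++ pvGetD m "content" "")]]) ms by
            simp [pvMergeA, h]]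
        rw [show pvMergeA [d] (m :: ms) =
              pvMergeA [[("role", pvRole m),
                ("content", pvGetD d "content" "" ++ "\n\n" ++ pvGetD m "content" "")]] ms by
            simp [pvMergeA, h]]
        exact ih acc _
      · rw [show pvMergeA (acc ++ [d]) (m :: ms) = pvMergeA ((acc ++ [d]) ++ [m]) ms by
              simp [pvMergeA, h]]
        rw [show pvMergeA [d] (m :: ms) = pvMergeA ([d] ++ [m]) ms by simp [pvMergeA, h]]
        rw [ih (acc ++ [d]) m, ih [d] m]
        simp

-- a single maximal run, as A folds it and as B emits it
theorem pvMergeA_run (ms : List (List (String × String))) :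
    ∀ (d : List (String × String)),
    pvMergeA [d] ms =
      (if ms.takeWhile (fun x => pvRole x == pvRole d) = [] then d
       else pvRunDict d (ms.takeWhile (fun x => pvRole x == pvRole d)))
        :: pvMergeB (ms.dropWhile (fun x => pvRole x == pvRole d)) := by
  induction ms with
  | nil => intro d; simp [pvMergeA, pvMergeB]
  | cons m t ih =>
      intro d
      by_cases h : pvRole m = pvRole d
      · have htw : (m :: t).takeWhile (fun x => pvRole x == pvRole d) =
            m :: t.takeWhile (fun x => pvRole x == pvRole d) := by
          simp [h]
        have hdw : (m :: t).dropWhile (fun x => pvRole x == pvRole d) =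
            t.dropWhile (fun x => pvRole x == pvRole d) := by
          simp [h]
        have hstep : pvMergeA [d] (m :: t) =
            pvMergeA [pvRunDict d [m]] t := by
          simp [pvMergeA, h.symm, pvRunDict, pvStrJoin_two]
        rw [hstep]
        have hrole : pvRole (pvRunDict d [m]) = pvRole d := pvRole_runDict d [m]
        rw [ih (pvRunDict d [m])]
        rw [htw, hdw, hrole]
        congr 1
        by_cases he : t.takeWhile (fun x => pvRole x == pvRole d) = []
        · simp [he, pvRunDict, pvStrJoin_two]
        · rw [if_neg he, if_neg (show ¬ (m :: t.takeWhile (fun x => pvRole x == pvRole d) = []) by simp)]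
          exact pvRunDict_fuse d m _
      · have htw : (m :: t).takeWhile (fun x => pvRole x == pvRole d) = [] := by
          simp [h]
        have hdw : (m :: t).dropWhile (fun x => pvRole x == pvRole d) = m :: t := by
          simp [h]
        have hne : ¬ (pvRole d = pvRole m) := fun hh => h hh.symm
        have hstep : pvMergeA [d] (m :: t) = pvMergeA ([d] ++ [m]) t := by
          simp [pvMergeA, hne]
        rw [hstep, pvMergeA_append t [d] m, htw, hdw, if_pos rfl, List.singleton_append, ih m]
        rw [show pvMergeB (m :: t) =
              (if t.takeWhile (fun x => pvRole x == pvRole m) = [] then m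
               else pvRunDict m (t.takeWhile (fun x => pvRole x == pvRole m)))
                :: pvMergeB (t.dropWhile (fun x => pvRole x == pvRole m)) by
            rw [pvMergeB]]

theorem pvMergeA_eq_pvMergeB (ns : List (List (String × String))) :
    pvMergeA [] ns = pvMergeB ns := by
  cases ns with
  | nil => simp [pvMergeA, pvMergeB]
  | cons m ms =>
      have h0 : pvMergeA [] (m :: ms) = pvMergeA [m] ms := by simp [pvMergeA]
      rw [h0, pvMergeA_run ms m]
      rw [show pvMergeB (m :: ms) =
            (if ms.takeWhile (fun x => pvRole x == pvRole m) = [] then m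
             else pvRunDict m (ms.takeWhile (fun x => pvRole x == pvRole m)))
              :: pvMergeB (ms.dropWhile (fun x => pvRole x == pvRole m)) by
          rw [pvMergeB]]

-- ===== VERDICT (by name: the statement is the Claim_ definition above) =====
theorem split_system_messages_py_spec : Claim_equal_split_system_messages_py := by
  intro messages _ _
  unfold Spec_split_system_messages_py split_system_messages_py split_system_messages_py_alt
  rw [pvFoldl_phase1 messages [] []]
  simp only [List.nil_append]
  rw [pvMergeA_eq_pvMergeB]
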